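-- pv_equiv track=rewrite | github.com/MrBrantCode/unitest_baseline | mut_generate/mist_train_cf/cf_37812/solution.py | process_addressbook_and_principals
-- ===== SOURCE A (Python) =====
-- def process_addressbook_and_principals(addressbook, principals):
--     current_addressbook_ctags = {}
--
--     for contact, phone in addressbook:
--         if contact not in current_addressbook_ctags:
--             current_addressbook_ctags[contact] = str(phone)
--         else:
--             current_addressbook_ctags[contact] += str(phone)
--
--     # Process principals' URIs (placeholder for actual processing)
--     for principal in principals:
--         # Placeholder for processing each principal's URI
--         pass
--
--     return current_addressbook_ctags
-- ===== SOURCE B (Python) =====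
-- def process_addressbook_and_principals(addressbook, principals):
--     # Distinct contacts in first-occurrence order.
--     contacts = list(dict.fromkeys(contact for contact, _ in addressbook))
--
--     # Keep the (no-op) iteration over principals, as in the original.
--     for principal in principals:
--         pass
--
--     # For each contact, gather-scan the whole addressbook and join its phones.
--     return {c: ''.join(str(phone) for contact, phone in addressbook if contact == c)
--             for c in contacts}
-- ===== Notes on version B (the rewrite author's own statement) =====
-- stated objective: alternative
-- what changed: B builds no accumulating dict: it first computes the distinct contacts in first-occurrence order, then for each contact re-scans the whole addressbook and joins that contact's stringified phones, replacing A's single-pass dict accumulation with per-key gather scans.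
import Mathlib
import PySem

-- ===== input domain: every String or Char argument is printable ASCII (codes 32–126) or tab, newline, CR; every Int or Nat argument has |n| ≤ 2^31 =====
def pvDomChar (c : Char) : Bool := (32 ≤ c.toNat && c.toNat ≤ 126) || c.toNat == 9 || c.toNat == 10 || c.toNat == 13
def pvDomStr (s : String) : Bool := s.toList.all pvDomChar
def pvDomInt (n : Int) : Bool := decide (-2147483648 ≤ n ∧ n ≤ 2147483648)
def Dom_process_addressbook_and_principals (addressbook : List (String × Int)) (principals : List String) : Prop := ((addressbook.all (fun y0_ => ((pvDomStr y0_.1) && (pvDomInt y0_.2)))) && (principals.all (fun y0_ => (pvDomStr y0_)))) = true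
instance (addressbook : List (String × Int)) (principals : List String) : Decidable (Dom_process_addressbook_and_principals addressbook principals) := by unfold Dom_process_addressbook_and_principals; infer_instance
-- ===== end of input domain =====

-- B computes the distinct contacts first and then gather-scans the whole addressbook once per contact,
-- joining that contact's stringified phones — no accumulating dict at all (objective: alternative algorithm).


-- ===== PORT A =====
def process_addressbook_and_principals (addressbook : List (String × Int)) (principals : List String) : List (String × String) :=
  let d := addressbook.foldl (fun d cp =>
    if d.contains cp.1 = false then
      d.insert cp.1 (PySem.Int.toStr cp.2)
    else
      d.modify cp.1 "" (fun s => s ++ PySem.Int.toStr cp.2))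
    (PySem.Dict.empty : PySem.Dict String String)
  let _ := principals.foldl (fun u _ => u) ()   -- 'for principal in principals: pass'
  d.items

-- ===== PORT B =====
def process_addressbook_and_principals_alt (addressbook : List (String × Int)) (principals : List String) : List (String × String) :=
  -- contacts = list(dict.fromkeys(contact for contact, _ in addressbook))
  let contacts := PySem.List.dedup (addressbook.map Prod.fst)
  let _ := principals.foldl (fun u _ => u) ()   -- 'for principal in principals: pass'
  -- {c: ''.join(str(phone) for contact, phone in addressbook if contact == c) for c in contacts}
  contacts.map (fun c =>
    (c, PySem.Str.join "" ((addressbook.filter (fun p => p.1 == c)).map (fun p => PySem.Int.toStr p.2))))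

-- ===== PRECONDITION & SPEC =====
def Spec_process_addressbook_and_principals (addressbook : List (String × Int)) (principals : List String) (out : List (String × String)) : Prop := out = process_addressbook_and_principals_alt addressbook principals
instance (addressbook : List (String × Int)) (principals : List String) (out : List (String × String)) : Decidable (Spec_process_addressbook_and_principals addressbook principals out) := by unfold Spec_process_addressbook_and_principals; infer_instance

-- ===== CLAIM =====
def Claim_equal_process_addressbook_and_principals : Prop := ∀ (addressbook : List (String × Int)) (principals : List String), Dom_process_addressbook_and_principals addressbook principals → Spec_process_addressbook_and_principals addressbook principals (process_addressbook_and_principals addressbook principals)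

-- ===== LEMMAS AND PROOFS =====

-- ''.join distributes over cons.
theorem pv_join_empty_cons (x : String) (xs : List String) :
    PySem.Str.join "" (x :: xs) = x ++ PySem.Str.join "" xs := by
  cases xs with
  | nil => simp [PySem.Str.join, PySem.Chars.join_singleton, PySem.Chars.join_nil]
  | cons y t => simp [PySem.Str.join, PySem.Chars.join_cons_cons]

-- A's loop step is extensionally a single Dict.modify.
theorem pv_stepA_eq_modify (d : PySem.Dict String String) (cp : String × Int) :
    (if d.contains cp.1 = false then d.insert cp.1 (PySem.Int.toStr cp.2)
     else d.modify cp.1 "" (fun s => s ++ PySem.Int.toStr cp.2))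
    = d.modify cp.1 "" (fun s => s ++ PySem.Int.toStr cp.2) := by
  by_cases h : d.contains cp.1 = false
  · simp [h, PySem.Dict.modify, PySem.Dict.getD_of_not_contains d "" h]
  · simp [h]

-- Value accumulated by A's modify loop at an arbitrary key.
theorem pv_getD_foldA (l : List (String × Int)) (d : PySem.Dict String String) (c : String) :
    (l.foldl (fun d cp => d.modify cp.1 "" (fun s => s ++ PySem.Int.toStr cp.2)) d).getD c ""
    = d.getD c "" ++ PySem.Str.join "" ((l.filter (fun p => p.1 == c)).map (fun p => PySem.Int.toStr p.2)) := by
  induction l generalizing d with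
  | nil => simp [PySem.Str.join, PySem.Chars.join_nil]
  | cons p t ih =>
    simp only [List.foldl_cons, ih, List.filter_cons]
    by_cases h : p.1 = c
    · simp [h, pv_join_empty_cons, String.append_assoc]
    · simp [h, PySem.Dict.getD_modify, Ne.symm h]

-- ===== VERDICT =====
theorem process_addressbook_and_principals_spec : Claim_equal_process_addressbook_and_principals := by
  intro addressbook principals _
  unfold Spec_process_addressbook_and_principals
  unfold process_addressbook_and_principals process_addressbook_and_principals_alt
  simp only [funext fun d => funext fun cp => pv_stepA_eq_modify d cp]
  set dA := addressbook.foldl (fun d cp => d.modify cp.1 "" (fun s => s ++ PySem.Int.toStr cp.2))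
      (PySem.Dict.empty : PySem.Dict String String) with hdA
  have hkA : dA.keys = PySem.Set.update ([] : List String) (addressbook.map Prod.fst) := by
    rw [hdA, PySem.Dict.keys_foldl_modify_key addressbook Prod.fst "" (fun d cp s => s ++ PySem.Int.toStr cp.2)]
    simp [PySem.Dict.keys_empty]
  have hnA : dA.keys.Nodup := by
    rw [hdA]
    exact PySem.Dict.nodup_keys_foldl_modify_key addressbook Prod.fst ""
      (fun d cp s => s ++ PySem.Int.toStr cp.2) PySem.Dict.empty (by simp [PySem.Dict.keys_empty])
  rw [PySem.Dict.items_eq_map_keys dA hnA ""]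
  have hded : PySem.List.dedup (addressbook.map Prod.fst)
      = PySem.Set.update ([] : List String) (addressbook.map Prod.fst) := by
    simp [PySem.List.dedup_eq_ofList, PySem.Set.ofList_eq_foldl, PySem.Set.update]
  rw [hkA, hded]
  refine List.map_congr_left (fun k _ => ?_)
  rw [hdA, pv_getD_foldA]
  simp [PySem.Dict.getD_empty]
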